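-- pv_equiv track=rewrite | github.com/KimDongChan95/Python-CodeKata | Basic_Python/021. Handle_code.py | solution
-- ===== SOURCE A (Python) =====
-- def solution(code):
--     ret = ""
--     mode = 0  # 시작 모드는 0
--
--     for idx in range(len(code)):
--         if code[idx] == "1":  # "1"이 나타나면 모드 전환
--             mode = 1 - mode
--         else:
--             if (mode == 0 and idx % 2 == 0) or (mode == 1 and idx % 2 != 0):
--                 ret += code[idx]
--
--     return ret if ret else "EMPTY"
-- ===== SOURCE B (Python) =====
-- def solution(code):
--     # pass 1: prefix-parity table -- parity[i] = (# of '1' in code[:i]) % 2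
--     parity = []
--     p = 0
--     for ch in code:
--         parity.append(p)
--         if ch == "1":
--             p = 1 - p
--     # pass 2: select characters by the table
--     kept = "".join(c for i, (c, q) in enumerate(zip(code, parity)) if c != "1" and i % 2 == q)
--     return kept if kept else "EMPTY"
-- ===== Notes on version B (the rewrite author's own statement) =====
-- stated objective: alternative
-- what changed: Replaces A's single fused loop with a mutable toggling mode by two separate passes: first a materialized prefix-parity table of counts of the toggle character, then a join of a comprehension selecting code[i] when it is not the toggle character and i % 2 equals parity[i].
import Mathlib
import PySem

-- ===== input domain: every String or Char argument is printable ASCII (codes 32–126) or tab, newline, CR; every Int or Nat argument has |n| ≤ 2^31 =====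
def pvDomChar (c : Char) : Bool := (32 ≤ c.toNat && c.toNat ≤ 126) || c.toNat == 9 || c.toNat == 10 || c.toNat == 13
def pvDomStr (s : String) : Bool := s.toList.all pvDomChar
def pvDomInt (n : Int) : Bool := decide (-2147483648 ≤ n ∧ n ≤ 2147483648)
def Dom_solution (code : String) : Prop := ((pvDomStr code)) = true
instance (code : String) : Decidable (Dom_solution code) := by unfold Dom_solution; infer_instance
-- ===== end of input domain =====

-- B replaces A's fused mode-toggling loop by two passes (prefix-parity table, then selection); same cost, alternative decomposition.

-- ===== PORT A =====
-- one fused loop: toggle mode on '1', else keep the char when mode/index parity agree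
def solution (code : String) : String :=
  let step : (List Char × Int) → (Int × Char) → (List Char × Int) := fun st p =>
    if p.2 = '1' then (st.1, 1 - st.2)
    else if (st.2 = 0 ∧ p.1 % 2 = 0) ∨ (st.2 = 1 ∧ p.1 % 2 ≠ 0) then (st.1 ++ [p.2], st.2)
    else st
  let r := (PySem.List.enumerate code.toList).foldl step ([], 0)
  if r.1.isEmpty then "EMPTY" else String.mk r.1

-- ===== PORT B =====
-- pass 1: prefix-parity table; pass 2: filter by table
def solution_alt (code : String) : String :=
  let par := (code.toList.foldl
      (fun (st : List Int × Int) ch =>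
        (st.1 ++ [st.2], if ch = '1' then 1 - st.2 else st.2)) ([], 0)).1
  let kept := (PySem.List.enumerate (code.toList.zip par)).filterMap
      (fun p => if p.2.1 ≠ '1' ∧ p.1 % 2 = p.2.2 then some p.2.1 else none)
  if kept.isEmpty then "EMPTY" else String.mk kept

-- ===== PRECONDITION & SPEC =====
def Spec_solution (code : String) (out : String) : Prop := out = solution_alt code
instance (code : String) (out : String) : Decidable (Spec_solution code out) := by unfold Spec_solution; infer_instance

-- ===== CLAIM (what is proved, stated in full; the proofs are below) =====
def Claim_equal_solution : Prop := ∀ (code : String), Dom_solution code → Spec_solution code (solution code)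

-- ===== LEMMAS AND PROOFS =====

-- common recursive description of the selected characters
def pvSel : List Char → Int → Int → List Char
  | [], _, _ => []
  | c :: cs, i, m =>
    if c = '1' then pvSel cs (i + 1) (1 - m)
    else if (m = 0 ∧ i % 2 = 0) ∨ (m = 1 ∧ i % 2 ≠ 0) then c :: pvSel cs (i + 1) m
    else pvSel cs (i + 1) m

-- the parity table as a recursive function
def pvTab : List Char → Int → List Int
  | [], _ => []
  | c :: cs, m => m :: pvTab cs (if c = '1' then 1 - m else m)

theorem pvA_fold (cs : List Char) : ∀ (i m : Int) (acc : List Char),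
    ((PySem.List.enumerate cs i).foldl
      (fun (st : List Char × Int) p =>
        if p.2 = '1' then (st.1, 1 - st.2)
        else if (st.2 = 0 ∧ p.1 % 2 = 0) ∨ (st.2 = 1 ∧ p.1 % 2 ≠ 0) then (st.1 ++ [p.2], st.2)
        else st) (acc, m)).1 = acc ++ pvSel cs i m := by
  induction cs with
  | nil => intro i m acc; simp [PySem.List.enumerate_nil, pvSel]
  | cons c cs ih =>
    intro i m acc
    rw [PySem.List.enumerate_cons, List.foldl_cons]
    by_cases h1 : c = '1'
    · simp only [h1, pvSel, eq_self_iff_true, if_true, ite_true]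
      exact ih (i + 1) (1 - m) acc
    · simp only [if_neg h1, pvSel]
      by_cases h2 : (m = 0 ∧ i % 2 = 0) ∨ (m = 1 ∧ i % 2 ≠ 0)
      · simp only [if_pos h2, ih, List.append_assoc, List.singleton_append]
      · simp only [if_neg h2, ih]

theorem pvB_tab (cs : List Char) : ∀ (m : Int) (acc : List Int),
    (cs.foldl (fun (st : List Int × Int) ch =>
        (st.1 ++ [st.2], if ch = '1' then 1 - st.2 else st.2)) (acc, m)).1
      = acc ++ pvTab cs m := by
  induction cs with
  | nil => intro m acc; simp [pvTab]
  | cons c cs ih =>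
    intro m acc
    rw [List.foldl_cons]
    simp only [pvTab, ih, List.append_assoc, List.singleton_append]

theorem pvB_filter (cs : List Char) : ∀ (i m : Int), (m = 0 ∨ m = 1) →
    (PySem.List.enumerate (cs.zip (pvTab cs m)) i).filterMap
      (fun p => if p.2.1 ≠ '1' ∧ p.1 % 2 = p.2.2 then some p.2.1 else none)
      = pvSel cs i m := by
  induction cs with
  | nil => intro i m _; simp [pvTab, PySem.List.enumerate_nil, pvSel]
  | cons c cs ih =>
    intro i m hm
    show (PySem.List.enumerate ((c, m) :: cs.zip (pvTab cs _)) i).filterMap _ = _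
    rw [PySem.List.enumerate_cons, List.filterMap_cons]
    by_cases h1 : c = '1'
    · have hcond : ¬ (c ≠ '1' ∧ i % 2 = m) := by tauto
      simp only [if_neg hcond, pvSel, if_pos (show c = '1' from h1)]
      have := ih (i + 1) (1 - m) (by omega)
      simpa [h1] using this
    · have hiff : (c ≠ '1' ∧ i % 2 = m) ↔ ((m = 0 ∧ i % 2 = 0) ∨ (m = 1 ∧ i % 2 ≠ 0)) := by
        constructor
        · rintro ⟨-, h⟩; omega
        · rintro (⟨h0, h2⟩ | ⟨h0, h2⟩) <;> exact ⟨h1, by omega⟩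
      simp only [pvSel, if_neg h1]
      by_cases h2 : (m = 0 ∧ i % 2 = 0) ∨ (m = 1 ∧ i % 2 ≠ 0)
      · simp only [if_pos h2, if_pos (hiff.mpr h2)]
        exact congrArg _ (ih (i + 1) m hm)
      · simp only [if_neg h2, if_neg (fun hc => h2 (hiff.mp hc))]
        exact ih (i + 1) m hm

-- ===== VERDICT (by name: the statement is the Claim_ definition above) =====
theorem solution_spec : Claim_equal_solution := by
  intro code _
  show solution code = solution_alt code
  unfold solution solution_alt
  simp only [pvA_fold, pvB_tab, pvB_filter code.toList 0 0 (Or.inl rfl), List.nil_append]
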